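-- pv_equiv track=rewrite | github.com/Beshkov/Python_Advanced | Tuples and Sets/Lab/05 - SoftUni Party.py | separate_into_vip_and_regular
-- ===== SOURCE A (Python) =====
-- def find_vip(guest):
--     return guest[0].isdigit()
--
-- def separate_into_vip_and_regular(guests):
--     vip_guests = []
--     regular_guests = []
--     for guest in guests:
--         if find_vip(guest):
--             vip_guests.append(guest)
--         else:
--             regular_guests.append(guest)
--     return (sorted(vip_guests), sorted(regular_guests))
-- ===== SOURCE B (Python) =====
-- def find_vip(guest):
--     return guest[0].isdigit()
--
-- def _insort(bucket, guest):
--     lo, hi = 0, len(bucket)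
--     while lo < hi:
--         mid = (lo + hi) // 2
--         if guest < bucket[mid]:
--             hi = mid
--         else:
--             lo = mid + 1
--     bucket.insert(lo, guest)
--
-- def separate_into_vip_and_regular(guests):
--     vip_guests = []
--     regular_guests = []
--     for guest in guests:
--         if find_vip(guest):
--             _insort(vip_guests, guest)
--         else:
--             _insort(regular_guests, guest)
--     return (vip_guests, regular_guests)
-- ===== Notes on version B (the rewrite author's own statement) =====
-- stated objective: alternative
-- what changed: B never calls sorted(): it keeps each bucket permanently sorted, binary-searching the insertion point and inserting every guest there in a single pass (online binary insertion sort interleaved with the partition), instead of A's partition-then-library-sort-each-bucket.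
import Mathlib
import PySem

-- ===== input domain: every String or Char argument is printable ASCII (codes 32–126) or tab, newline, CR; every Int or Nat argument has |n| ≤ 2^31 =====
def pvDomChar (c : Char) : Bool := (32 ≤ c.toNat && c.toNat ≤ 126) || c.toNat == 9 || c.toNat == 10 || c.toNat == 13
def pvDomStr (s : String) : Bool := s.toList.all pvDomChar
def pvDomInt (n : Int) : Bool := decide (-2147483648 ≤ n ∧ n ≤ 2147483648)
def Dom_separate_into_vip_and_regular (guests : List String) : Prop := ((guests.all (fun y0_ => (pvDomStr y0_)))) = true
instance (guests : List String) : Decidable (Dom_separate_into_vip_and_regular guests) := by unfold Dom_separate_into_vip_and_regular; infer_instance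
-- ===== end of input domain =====

-- B never calls sorted(): it keeps each bucket permanently sorted, binary-searching each guest's insertion point; alternative algorithm.

-- ===== PORT A =====
-- guest[0].isdigit(); on the empty string Python raises IndexError (excluded by Pre_), the port returns false there.
def find_vip (guest : String) : Bool :=
  match PySem.Str.pyGet? guest 0 with
  | some c => PySem.Chars.isdigit c
  | none => false

def separate_into_vip_and_regular (guests : List String) : List String × List String :=
  let r := guests.foldl
    (fun (acc : List String × List String) guest =>
      if find_vip guest then (acc.1 ++ [guest], acc.2) else (acc.1, acc.2 ++ [guest]))
    ([], [])
  (PySem.List.sorted r.1 (fun x => x), PySem.List.sorted r.2 (fun x => x))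

-- ===== PORT B =====
-- the 'while lo < hi' binary-search loop of _insort; bucket[mid] is always in range when
-- called with hi ≤ len(bucket) (the getD "" default is never read), comparison is Python's
-- lexicographic string '<'
def insortLoop (bucket : List String) (guest : String) (lo hi : Nat) : Nat :=
  if _h : lo < hi then
    let mid := (lo + hi) / 2
    if guest < bucket.getD mid "" then insortLoop bucket guest lo mid
    else insortLoop bucket guest (mid + 1) hi
  else lo
termination_by hi - lo
decreasing_by all_goals omega

-- _insort: find the insertion point by binary search, then bucket.insert(lo, guest)
def insort (bucket : List String) (guest : String) : List String :=
  PySem.List.insert bucket ((insortLoop bucket guest 0 bucket.length : Nat) : Int) guest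

def separate_into_vip_and_regular_alt (guests : List String) : List String × List String :=
  guests.foldl
    (fun (acc : List String × List String) guest =>
      if find_vip guest then (insort acc.1 guest, acc.2)
      else (acc.1, insort acc.2 guest))
    ([], [])

-- ===== PRECONDITION & SPEC =====
-- Pre_ excludes lists containing the empty string, on which both A and B raise IndexError at guest[0].
def Pre_separate_into_vip_and_regular (guests : List String) : Prop := ∀ g ∈ guests, g ≠ ""
instance (guests : List String) : Decidable (Pre_separate_into_vip_and_regular guests) := by unfold Pre_separate_into_vip_and_regular; infer_instance

def pvWitness_separate_into_vip_and_regular : List String := ["7Dave", "Ann", "3Bo", "zed"]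

def Spec_separate_into_vip_and_regular (guests : List String) (out : List String × List String) : Prop := out = separate_into_vip_and_regular_alt guests
instance (guests : List String) (out : List String × List String) : Decidable (Spec_separate_into_vip_and_regular guests out) := by unfold Spec_separate_into_vip_and_regular; infer_instance

-- ===== CLAIM (what is proved, stated in full; the proofs are below) =====
def Claim_equal_separate_into_vip_and_regular : Prop := ∀ (guests : List String), Dom_separate_into_vip_and_regular guests → Pre_separate_into_vip_and_regular guests → Spec_separate_into_vip_and_regular guests (separate_into_vip_and_regular guests)

-- ===== LEMMAS AND PROOFS =====

-- proof-side model of one sorted insertion: insert before the first strictly greater element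
def insertSorted (guest : String) : List String → List String
  | [] => [guest]
  | x :: t => if x ≤ guest then x :: insertSorted guest t else guest :: x :: t

theorem insertSorted_perm (g : String) (l : List String) :
    (insertSorted g l).Perm (g :: l) := by
  induction l with
  | nil => simp [insertSorted]
  | cons x t ih =>
    unfold insertSorted
    split
    · exact (ih.cons x).trans (List.Perm.swap g x t)
    · exact List.Perm.refl _

theorem insertSorted_pairwise (g : String) (l : List String)
    (h : l.Pairwise (· ≤ ·)) : (insertSorted g l).Pairwise (· ≤ ·) := by
  induction l with
  | nil => simp [insertSorted]
  | cons x t ih =>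
    rcases List.pairwise_cons.mp h with ⟨hx, ht⟩
    unfold insertSorted
    split
    · rename_i hxg
      refine List.pairwise_cons.mpr ⟨?_, ih ht⟩
      intro y hy
      rcases List.mem_cons.mp ((insertSorted_perm g t).mem_iff.mp hy) with heq | hyt
      · exact heq ▸ hxg
      · exact hx y hyt
    · rename_i hxg
      refine List.pairwise_cons.mpr ⟨?_, h⟩
      intro y hy
      rcases List.mem_cons.mp hy with heq | hyt
      · exact heq ▸ le_of_not_ge hxg
      · exact le_trans (le_of_not_ge hxg) (hx y hyt)

-- the binary-search loop returns a point r with everything left of it ≤ guest and everything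
-- from it on > guest (invariant-carrying spec, by the loop's own induction principle)
theorem insortLoop_spec (l : List String) (g : String) (lo hi : Nat)
    (hs : l.Pairwise (· ≤ ·)) (hlh : lo ≤ hi) (hhl : hi ≤ l.length)
    (h1 : ∀ j (_ : j < l.length), j < lo → l[j] ≤ g)
    (h2 : ∀ j (_ : j < l.length), hi ≤ j → g < l[j]) :
    lo ≤ insortLoop l g lo hi ∧ insortLoop l g lo hi ≤ hi ∧
    (∀ j (_ : j < l.length), j < insortLoop l g lo hi → l[j] ≤ g) ∧
    (∀ j (_ : j < l.length), insortLoop l g lo hi ≤ j → g < l[j]) := by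
  have hmono := List.pairwise_iff_getElem.mp hs
  revert hlh hhl h1 h2
  induction lo, hi using insortLoop.induct l g with
  | case1 lo hi h mid hlt ih =>
    intro hlh hhl h1 h2
    have hmid1 : lo ≤ mid := by omega
    have hmid2 : mid < hi := by omega
    have hmlt : mid < l.length := by omega
    have hget : l.getD mid "" = l[mid] := by
      simp [List.getD_eq_getElem?_getD, List.getElem?_eq_getElem hmlt]
    have helem : g < l[mid] := hget ▸ hlt
    have hmideq : mid = (lo + hi) / 2 := rfl
    rw [insortLoop]
    simp only [dif_pos h]
    rw [← hmideq, if_pos hlt]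
    obtain ⟨ha, hb, hc, hd⟩ := ih (by omega) (by omega) h1
      (fun j hj hmj => by
        rcases Nat.eq_or_lt_of_le hmj with heq | hlt2
        · exact heq ▸ helem
        · exact lt_of_lt_of_le helem (hmono mid j hmlt hj hlt2))
    exact ⟨ha, by omega, hc, hd⟩
  | case2 lo hi h mid hge ih =>
    intro hlh hhl h1 h2
    have hmlt : mid < l.length := by omega
    have hget : l.getD mid "" = l[mid] := by
      simp [List.getD_eq_getElem?_getD, List.getElem?_eq_getElem hmlt]
    have hmg : l[mid] ≤ g := le_of_not_gt (hget ▸ hge)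
    have hmideq : mid = (lo + hi) / 2 := rfl
    rw [insortLoop]
    simp only [dif_pos h]
    rw [← hmideq, if_neg hge]
    obtain ⟨ha, hb, hc, hd⟩ := ih (by omega) hhl
      (fun j hj hjm => by
        rcases Nat.lt_succ_iff_lt_or_eq.mp hjm with hlt2 | heq
        · exact le_trans (hmono j mid hj hmlt hlt2) hmg
        · exact heq ▸ hmg)
      h2
    exact ⟨by omega, hb, hc, hd⟩
  | case3 lo hi h =>
    intro hlh hhl h1 h2
    rw [insortLoop]
    simp only [dif_neg h]
    exact ⟨le_refl _, hlh, h1, fun j hj hloj => h2 j hj (by omega)⟩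

-- inserting at any point r with that property produces exactly insertSorted
theorem insert_at_point (g : String) (l : List String) (r : Nat) (hr : r ≤ l.length)
    (h1 : ∀ j (_ : j < l.length), j < r → l[j] ≤ g)
    (h2 : ∀ j (_ : j < l.length), r ≤ j → g < l[j]) :
    l.take r ++ g :: l.drop r = insertSorted g l := by
  induction l generalizing r with
  | nil => simp [insertSorted]
  | cons x t ih =>
    cases r with
    | zero =>
      have hx : g < x := h2 0 (by simp) (by omega)
      simp [insertSorted, not_le_of_gt hx]
    | succ s =>
      have hx : x ≤ g := h1 0 (by simp) (by omega)
      simp only [List.take_succ_cons, List.drop_succ_cons, List.cons_append, insertSorted, hx,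
        if_pos]
      exact congrArg (x :: ·) (ih s (by simpa using hr)
        (fun j hj hjs => h1 (j+1) (by simpa using hj) (by omega))
        (fun j hj hsj => h2 (j+1) (by simpa using hj) (by omega)))

-- on a sorted bucket, binary-search insertion is insertSorted
theorem insort_eq_insertSorted (l : List String) (g : String) (hs : l.Pairwise (· ≤ ·)) :
    insort l g = insertSorted g l := by
  obtain ⟨_, hle, hl, hr⟩ := insortLoop_spec l g 0 l.length hs (Nat.zero_le _) (le_refl _)
    (fun j hj hj0 => absurd hj0 (Nat.not_lt_zero j))
    (fun j hj hlen => absurd hj (not_lt_of_ge hlen))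
  unfold insort
  rw [PySem.List.insert_natCast l (insortLoop l g 0 l.length) g hle]
  exact insert_at_point g l _ hle hl hr

-- B's fold is the fold of insertSorted (both buckets stay sorted throughout)
theorem foldl_insort_eq (xs : List String) (acc : List String × List String)
    (ha : acc.1.Pairwise (· ≤ ·)) (hb : acc.2.Pairwise (· ≤ ·)) :
    xs.foldl (fun (acc : List String × List String) g =>
      if find_vip g then (insort acc.1 g, acc.2) else (acc.1, insort acc.2 g)) acc
    = xs.foldl (fun (acc : List String × List String) g =>
      if find_vip g then (insertSorted g acc.1, acc.2) else (acc.1, insertSorted g acc.2)) acc := by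
  induction xs generalizing acc with
  | nil => rfl
  | cons x t ih =>
    simp only [List.foldl_cons]
    by_cases h : find_vip x = true
    · rw [h, if_pos rfl, if_pos rfl, insort_eq_insertSorted _ _ ha]
      exact ih _ (insertSorted_pairwise x acc.1 ha) hb
    · rw [if_neg (by simp [h]), if_neg (by simp [h]), insort_eq_insertSorted _ _ hb]
      exact ih _ ha (insertSorted_pairwise x acc.2 hb)

-- the insertSorted fold splits into two independent insertion folds over the filtered sublists
theorem foldl_alt_split (p : String → Bool) (xs : List String) (acc : List String × List String) :
    xs.foldl (fun (acc : List String × List String) g =>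
      if p g then (insertSorted g acc.1, acc.2) else (acc.1, insertSorted g acc.2)) acc
    = ((xs.filter p).foldl (fun l g => insertSorted g l) acc.1,
       (xs.filter (fun g => !p g)).foldl (fun l g => insertSorted g l) acc.2) := by
  induction xs generalizing acc with
  | nil => simp
  | cons x t ih =>
    by_cases h : p x = true <;> simp [List.foldl_cons, h, ih]

theorem foldl_insertSorted_perm (ys : List String) (acc : List String) :
    (ys.foldl (fun l g => insertSorted g l) acc).Perm (acc ++ ys) := by
  induction ys generalizing acc with
  | nil => simp
  | cons y t ih =>
    rw [List.foldl_cons]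
    exact (ih _).trans (((insertSorted_perm y acc).append_right t).trans
      (by simpa using (List.perm_middle (a := y) (l₁ := acc) (l₂ := t)).symm))

theorem foldl_insertSorted_pairwise (ys : List String) (acc : List String)
    (h : acc.Pairwise (· ≤ ·)) :
    (ys.foldl (fun l g => insertSorted g l) acc).Pairwise (· ≤ ·) := by
  induction ys generalizing acc with
  | nil => exact h
  | cons y t ih => exact ih _ (insertSorted_pairwise y acc h)

-- iterated sorted insertion is PySem's sorted (the sorted order is unique up to permutation)
theorem foldl_insertSorted_eq_sorted (ys : List String) :
    ys.foldl (fun l g => insertSorted g l) [] = PySem.List.sorted ys (fun x => x) := by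
  exact (PySem.List.sorted_id_eq_of_perm_of_pairwise _ _
    (by simpa using foldl_insertSorted_perm ys [])
    (foldl_insertSorted_pairwise ys [] (by simp))).symm

-- A's fold is a partition: it returns (filter p, filter ¬p)
theorem foldl_partition (p : String → Bool) (xs : List String) (acc : List String × List String) :
    xs.foldl (fun (acc : List String × List String) g =>
      if p g then (acc.1 ++ [g], acc.2) else (acc.1, acc.2 ++ [g])) acc
    = (acc.1 ++ xs.filter p, acc.2 ++ xs.filter (fun g => !p g)) := by
  induction xs generalizing acc with
  | nil => simp
  | cons x t ih =>
    by_cases h : p x = true <;> simp [List.foldl_cons, h, ih]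

-- ===== VERDICT (by name: the statement is the Claim_ definition above) =====
theorem separate_into_vip_and_regular_spec : Claim_equal_separate_into_vip_and_regular := by
  intro guests _ _
  unfold Spec_separate_into_vip_and_regular separate_into_vip_and_regular separate_into_vip_and_regular_alt
  rw [foldl_partition, foldl_insort_eq _ _ (by simp) (by simp), foldl_alt_split]
  simp [foldl_insertSorted_eq_sorted]
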